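-- pv_equiv track=rewrite | github.com/df7cb/aoc | 2024/11a.py | step
-- ===== SOURCE A (Python) =====
-- def step(stones):
--     new = []
--     for x in stones:
--         if x == 0:
--             new.append(1)
--         elif len(str(x)) % 2 == 0:
--             s = str(x)
--             l = len(s)
--             new.append(int(s[:int(l/2)]))
--             new.append(int(s[int(l/2):]))
--         else:
--             new.append(x * 2024)
--     return new
-- ===== SOURCE B (Python) =====
-- def _ndigits(n):
--     return 1 if n < 10 else 1 + _ndigits(n // 10)
--
--
-- def _blink(x):
--     if x == 0:
--         return [1]
--     d = _ndigits(x)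
--     if d % 2:
--         return [x * 2024]
--     p = 10 ** (d // 2)
--     return [x // p, x % p]
--
--
-- def step(stones):
--     return [y for x in stones for y in _blink(x)]
-- ===== Notes on version B (the rewrite author's own statement) =====
-- stated objective: alternative
-- what changed: Each stone's split is computed with integer arithmetic (recursive digit count, then divmod by 10**half) instead of str/slice/int round-trips, and the output list is built by a flat comprehension over a per-stone helper instead of an accumulator loop with appends.
-- outside the precondition, e.g. on step([-123]): A returns [-1, 23], B returns [-248952]
import Mathlib
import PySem

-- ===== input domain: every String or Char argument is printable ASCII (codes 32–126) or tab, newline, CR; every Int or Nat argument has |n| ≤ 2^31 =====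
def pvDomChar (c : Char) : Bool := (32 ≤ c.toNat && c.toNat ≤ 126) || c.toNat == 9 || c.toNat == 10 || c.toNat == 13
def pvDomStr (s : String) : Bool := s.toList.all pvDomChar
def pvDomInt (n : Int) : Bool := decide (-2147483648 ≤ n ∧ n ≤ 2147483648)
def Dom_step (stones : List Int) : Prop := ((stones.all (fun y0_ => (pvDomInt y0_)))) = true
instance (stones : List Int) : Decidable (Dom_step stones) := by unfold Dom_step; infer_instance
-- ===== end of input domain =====

-- B replaces A's string slicing by integer digit arithmetic (recursive digit count + divmod by a
-- power of ten) and builds the result with a flat comprehension instead of an accumulator loop.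

-- ===== PORT A =====
-- Literal port of A. Notes on exactness:
--  * `len(str(x))` → PySem.Str.len (PySem.Int.toStr x);  `int(l/2)` equals `l // 2` here since
--    l = len(str(x)) ≥ 1 is a small nonnegative int (float division by 2 is exact at these sizes).
--  * `int(...)` → PySem.Int.ofStr?; the `.getD 0` default is only reached where Python's int()
--    would raise ValueError (negative stones whose |x| has an odd digit count) — outside Pre_step.
def step (stones : List Int) : List Int :=
  stones.foldl (fun new x =>
    if x == 0 then
      new ++ [1]
    else if PySem.Int.mod (PySem.Str.len (PySem.Int.toStr x)) 2 == 0 then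
      let s := PySem.Int.toStr x
      let l := PySem.Str.len s
      new ++ [(PySem.Int.ofStr? (PySem.Str.slice s none (some (PySem.Int.floordiv l 2)))).getD 0,
              (PySem.Int.ofStr? (PySem.Str.slice s (some (PySem.Int.floordiv l 2)) none)).getD 0]
    else
      new ++ [x * 2024]) []

-- ===== PORT B =====
-- port of Source B's `_ndigits` (termination: for n ≥ 10, n // 10 < n)
def ndigits (n : Int) : Int :=
  if n < 10 then 1 else 1 + ndigits (PySem.Int.floordiv n 10)
termination_by n.toNat
decreasing_by
  rw [PySem.Int.floordiv_eq_ediv_of_pos (by omega)]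
  omega

-- port of Source B's `_blink`; in `10 ** (d // 2)` the exponent d // 2 ≥ 0, so `.toNat` is exact
def blinkAlt (x : Int) : List Int :=
  if x == 0 then [1]
  else
    let d := ndigits x
    if PySem.Int.mod d 2 != 0 then [x * 2024]
    else
      let p : Int := 10 ^ (PySem.Int.floordiv d 2).toNat
      [PySem.Int.floordiv x p, PySem.Int.mod x p]

def step_alt (stones : List Int) : List Int :=
  stones.flatMap blinkAlt

-- ===== PRECONDITION & SPEC =====
-- Pre_ excludes exactly the negative stones whose absolute value has an ODD number of digits
-- (the ranges below are the even-digit-count negatives, which are kept): on the excluded stones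
-- A either raises ValueError (one digit: int('-')) or splits the sign-prefixed decimal string
-- (-123 → [-1, 23]) while B treats the split rule as applying to the value and multiplies by 2024
-- (-123 → [-248952]); both corner choices are defensible, so those stones are excluded.
def Pre_step (stones : List Int) : Prop :=
  ∀ x ∈ stones, 0 ≤ x ∨ (10 ≤ -x ∧ -x ≤ 99) ∨ (1000 ≤ -x ∧ -x ≤ 9999) ∨
    (100000 ≤ -x ∧ -x ≤ 999999) ∨ (10000000 ≤ -x ∧ -x ≤ 99999999) ∨
    (1000000000 ≤ -x ∧ -x ≤ 9999999999)
instance (stones : List Int) : Decidable (Pre_step stones) := by unfold Pre_step; infer_instance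

def pvWitness_step : List Int := [0, 7, 10, 99, 2024, 1000000, -42, -2024]

def Spec_step (stones : List Int) (out : List Int) : Prop := out = step_alt stones
instance (stones : List Int) (out : List Int) : Decidable (Spec_step stones out) := by unfold Spec_step; infer_instance

-- ===== CLAIM (what is proved, stated in full; the proofs are below) =====
def Claim_equal_step : Prop := ∀ (stones : List Int), Dom_step stones → Pre_step stones → Spec_step stones (step stones)

-- ===== LEMMAS AND PROOFS =====

-- value of a most-significant-first decimal digit string, with accumulator
def pvValFrom (acc : Nat) (ds : List Char) : Nat := ds.foldl (fun a c => a * 10 + (c.toNat - 48)) acc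
def pvValMSB (ds : List Char) : Nat := pvValFrom 0 ds

-- `PySem.Int.ofChars?`'s digit loop is a private definition; capture it (together with its
-- defining equations) through unification, so the proofs below can reason about it by name.
theorem pvGoSpec : ∃ g : List Char → Bool → Nat → Option Nat,
    (PySem.Int.ofChars? = fun s =>
      have cs := (List.dropWhile PySem.Int.isIntSpace (List.dropWhile PySem.Int.isIntSpace s).reverse).reverse
      match cs with
      | '-' :: ds => Option.map (fun n => -n) (do let a ← (match ds with | [] => none | cs' => g cs' false 0); pure ((a : Nat) : Int))
      | '+' :: ds => Option.map (fun n => n) (do let a ← (match ds with | [] => none | cs' => g cs' false 0); pure ((a : Nat) : Int))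
      | ds => Option.map (fun n => n) (do let a ← (match ds with | [] => none | cs' => g cs' false 0); pure ((a : Nat) : Int))) ∧
    (∀ b acc, g [] b acc = if b = true then some acc else none) ∧
    (∀ c rest b acc, g (c :: rest) b acc =
      if c.isDigit = true then g rest true (acc * 10 + (c.toNat - '0'.toNat))
      else if c = '_' ∧ b = true then
        (match rest with | d :: _ => if d.isDigit = true then g rest false acc else none | [] => none)
      else none) :=
  ⟨_, rfl, fun b acc => rfl, fun c rest b acc => rfl⟩

theorem pvDigitNotSpace (c : Char) (h : c.isDigit = true) : ¬ (PySem.Int.isIntSpace c = true) := by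
  intro hsp
  simp only [PySem.Int.isIntSpace, Bool.or_eq_true, decide_eq_true_eq] at hsp
  rcases hsp with ((((h1|h1)|h1)|h1)|h1)|h1 <;> subst h1 <;> simp at h

-- int() of a nonempty string of decimal digits returns its value
theorem pvOfCharsDigits (ds : List Char) (hne : ds ≠ []) (hd : ∀ c ∈ ds, c.isDigit = true) :
    PySem.Int.ofChars? ds = some ((pvValMSB ds : Nat) : Int) := by
  obtain ⟨g, hw, hnil, hcons⟩ := pvGoSpec
  have gloop : ∀ rest, (∀ c ∈ rest, c.isDigit = true) → ∀ acc,
      g rest true acc = some (pvValFrom acc rest) := by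
    intro rest
    induction rest with
    | nil => intro _ acc; simp [hnil, pvValFrom]
    | cons c rest' ih =>
      intro hall acc
      rw [hcons, if_pos (hall c (List.mem_cons_self ..))]
      rw [ih (fun x hx => hall x (List.mem_cons_of_mem _ hx))]
      simp [pvValFrom]
  rw [hw]
  simp only
  rw [List.dropWhile_eq_self_iff.mpr ?h2]
  case h2 =>
    intro h hx
    refine pvDigitNotSpace _ (hd _ ?_) hx
    have := List.getElem_mem h
    rw [List.mem_reverse] at this
    exact List.dropWhile_subset _ this
  rw [List.dropWhile_eq_self_iff.mpr ?h1]
  case h1 => intro h hx; exact pvDigitNotSpace _ (hd _ (List.getElem_mem h)) hx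
  rw [List.reverse_reverse]
  split
  · exact absurd (hd '-' (List.mem_cons_self ..)) (by simp)
  · exact absurd (hd '+' (List.mem_cons_self ..)) (by simp)
  · cases ds with
    | nil => exact absurd rfl hne
    | cons d rest =>
      simp only
      rw [hcons, if_pos (hd d (List.mem_cons_self ..))]
      rw [gloop rest (fun x hx => hd x (List.mem_cons_of_mem _ hx))]
      simp [pvValMSB, pvValFrom]

-- decimal digits of a natural number, most significant first
def pvDigits (m : Nat) : List Char :=
  if h : m < 10 then [Nat.digitChar m] else pvDigits (m / 10) ++ [Nat.digitChar (m % 10)]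
decreasing_by omega

theorem pvToDigitsCore_eq (f : Nat) : ∀ (m : Nat) (acc : List Char), m < f →
    Nat.toDigitsCore 10 f m acc = pvDigits m ++ acc := by
  induction f with
  | zero => omega
  | succ f ih =>
    intro m acc hm
    by_cases h10 : m < 10
    · have : m / 10 = 0 := by omega
      simp only [Nat.toDigitsCore, this]
      rw [pvDigits, dif_pos h10]
      have : m % 10 = m := by omega
      rw [this]
      rfl
    · have hq : ¬ (m / 10 = 0) := by omega
      simp only [Nat.toDigitsCore, hq]
      rw [ih (m / 10) _ (by omega)]
      conv_rhs => rw [pvDigits]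
      rw [dif_neg h10]
      simp

theorem pvToDigits_eq (m : Nat) : Nat.toDigits 10 m = pvDigits m :=
  (pvToDigitsCore_eq (m + 1) m [] (by omega)).trans (by simp)

theorem pvToChars_eq (x : Int) (hx : 0 ≤ x) : PySem.Int.toChars x = pvDigits x.toNat := by
  rw [PySem.Int.toChars, if_neg (by omega), pvToDigits_eq]

theorem pvDigits_ne_nil (m : Nat) : pvDigits m ≠ [] := by
  rw [pvDigits]; split <;> simp

theorem pvDigitChar_isDigit (k : Nat) (hk : k < 10) : (Nat.digitChar k).isDigit = true := by
  interval_cases k <;> decide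

theorem pvDigitChar_toNat (k : Nat) (hk : k < 10) : (Nat.digitChar k).toNat - 48 = k := by
  interval_cases k <;> decide

theorem pvDigits_all_digit (m : Nat) : ∀ c ∈ pvDigits m, c.isDigit = true := by
  induction m using Nat.strong_induction_on with
  | _ m ih =>
    intro c hc
    rw [pvDigits] at hc
    split at hc
    · simp at hc; subst hc; exact pvDigitChar_isDigit m (by omega)
    · rename_i h10
      rcases List.mem_append.mp hc with h | h
      · exact ih (m / 10) (by omega) c h
      · simp at h; subst h; exact pvDigitChar_isDigit _ (by omega)

theorem pvValFrom_append (acc : Nat) (ds es : List Char) :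
    pvValFrom acc (ds ++ es) = pvValFrom (pvValFrom acc ds) es := by
  simp [pvValFrom]

theorem pvValFrom_eq (es : List Char) : ∀ acc, pvValFrom acc es = acc * 10 ^ es.length + pvValMSB es := by
  induction es with
  | nil => intro acc; simp [pvValFrom, pvValMSB]
  | cons c es ih =>
    intro acc
    have h1 : pvValFrom acc (c :: es) = pvValFrom (acc * 10 + (c.toNat - 48)) es := by
      simp [pvValFrom]
    have h2 : pvValMSB (c :: es) = pvValFrom (0 * 10 + (c.toNat - 48)) es := by
      simp [pvValMSB, pvValFrom]
    rw [h1, h2, ih, ih]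
    ring_nf
    simp [List.length_cons, pow_succ]
    ring

theorem pvValMSB_digits (m : Nat) : pvValMSB (pvDigits m) = m := by
  induction m using Nat.strong_induction_on with
  | _ m ih =>
    rw [pvDigits]
    split
    · rename_i h10
      simp [pvValMSB, pvValFrom, pvDigitChar_toNat m h10]
    · rename_i h10
      rw [pvValMSB, pvValFrom_append]
      have h1 : ∀ a : Nat, pvValFrom a [Nat.digitChar (m % 10)] = a * 10 + (m % 10) := by
        intro a; simp [pvValFrom, pvDigitChar_toNat (m % 10) (by omega)]
      rw [h1]
      have h2 := ih (m / 10) (by omega)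
      rw [pvValMSB] at h2
      rw [h2]
      omega

theorem pvDigitBounds (c : Char) (h : c.isDigit = true) : 48 ≤ c.toNat ∧ c.toNat ≤ 57 := by
  simp [Char.isDigit] at h
  obtain ⟨h1, h2⟩ := h
  rw [UInt32.le_iff_toNat_le] at h1 h2
  exact ⟨h1, h2⟩

theorem pvValFrom_singleton (a : Nat) (c : Char) : pvValFrom a [c] = a * 10 + (c.toNat - 48) := rfl

theorem pvValMSB_lt (ds : List Char) (hd : ∀ c ∈ ds, c.isDigit = true) :
    pvValMSB ds < 10 ^ ds.length := by
  induction ds using List.reverseRecOn with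
  | nil => simp [pvValMSB, pvValFrom]
  | append_singleton ds c ih =>
    rw [pvValMSB, pvValFrom_append, pvValFrom_singleton]
    have hc : c.toNat - 48 ≤ 9 := by
      have := pvDigitBounds c (hd c (by simp))
      omega
    have hds := ih (fun x hx => hd x (List.mem_append_left _ hx))
    rw [pvValMSB] at hds
    rw [List.length_append, List.length_singleton, pow_succ]
    omega

theorem pvNdigits_eq (m : Nat) : ndigits (m : Int) = ((pvDigits m).length : Int) := by
  induction m using Nat.strong_induction_on with
  | _ m ih =>
    rw [ndigits, pvDigits]
    by_cases h10 : m < 10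
    · rw [if_pos (by exact_mod_cast h10), dif_pos h10]
      simp
    · rw [if_neg (by exact_mod_cast h10), dif_neg h10]
      rw [show (10 : Int) = ((10 : Nat) : Int) from rfl, PySem.Int.floordiv_natCast]
      rw [ih (m / 10) (by omega)]
      simp
      omega

theorem pvDigits_length_eq (k : Nat) : ∀ m : Nat, 10 ^ k ≤ m → m < 10 ^ (k + 1) →
    (pvDigits m).length = k + 1 := by
  induction k with
  | zero =>
    intro m _ h2
    rw [pvDigits, dif_pos (by omega)]
    rfl
  | succ k ih =>
    intro m h1 h2
    have h10 : ¬ m < 10 := by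
      have : (10:Nat) ^ 1 ≤ 10 ^ (k + 1) := Nat.pow_le_pow_right (by omega) (by omega)
      simp at this
      omega
    rw [pvDigits, dif_neg h10]
    rw [List.length_append, List.length_singleton]
    have hq1 : 10 ^ k ≤ m / 10 := Nat.le_div_iff_mul_le (by omega) |>.mpr (by rw [← pow_succ]; omega)
    have hq2 : m / 10 < 10 ^ (k + 1) := Nat.div_lt_iff_lt_mul (by omega) |>.mpr (by rw [← pow_succ]; omega)
    rw [ih (m / 10) hq1 hq2]

-- splitting the digit string after k characters splits the value by 10^(length - k)
theorem pvSplit (m k : Nat) :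
    pvValMSB ((pvDigits m).take k) = m / 10 ^ ((pvDigits m).length - k) ∧
    pvValMSB ((pvDigits m).drop k) = m % 10 ^ ((pvDigits m).length - k) := by
  have hsplit : (pvDigits m).take k ++ (pvDigits m).drop k = pvDigits m := List.take_append_drop ..
  have hval : pvValMSB ((pvDigits m).take k) * 10 ^ ((pvDigits m).length - k)
      + pvValMSB ((pvDigits m).drop k) = m := by
    have := congrArg pvValMSB hsplit
    rw [pvValMSB, pvValFrom_append, pvValFrom_eq] at this
    rw [pvValMSB_digits] at this
    rw [List.length_drop] at this
    rw [← pvValMSB] at this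
    exact this
  have hlt : pvValMSB ((pvDigits m).drop k) < 10 ^ ((pvDigits m).length - k) := by
    have := pvValMSB_lt ((pvDigits m).drop k)
      (fun c hc => pvDigits_all_digit m c (List.mem_of_mem_drop hc))
    rwa [List.length_drop] at this
  have key : ∀ A B P : Nat, 0 < P → B < P → A = (A * P + B) / P ∧ B = (A * P + B) % P := by
    intro A B P hP hB
    rw [Nat.mul_comm, Nat.mul_add_div hP, Nat.mul_add_mod]
    rw [Nat.div_eq_of_lt hB, Nat.mod_eq_of_lt hB]
    omega
  have hres := key (pvValMSB ((pvDigits m).take k)) (pvValMSB ((pvDigits m).drop k)) _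
    (show 0 < 10 ^ ((pvDigits m).length - k) by positivity) hlt
  rw [hval] at hres
  exact hres

-- what A's loop body appends for one stone
def pvStepOne (x : Int) : List Int :=
  if x == 0 then [1]
  else if PySem.Int.mod (PySem.Str.len (PySem.Int.toStr x)) 2 == 0 then
    let s := PySem.Int.toStr x
    let l := PySem.Str.len s
    [(PySem.Int.ofStr? (PySem.Str.slice s none (some (PySem.Int.floordiv l 2)))).getD 0,
     (PySem.Int.ofStr? (PySem.Str.slice s (some (PySem.Int.floordiv l 2)) none)).getD 0]
  else [x * 2024]

theorem pvStepOne_eq (x : Int) (hx : 0 ≤ x) : pvStepOne x = blinkAlt x := by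
  by_cases h0 : x = 0
  · subst h0; rfl
  · have hm : x = ((x.toNat : Nat) : Int) := by omega
    set m : Nat := x.toNat with hmdef
    have hm1 : 1 ≤ m := by omega
    have hbe : (x == 0) = false := by simp [h0]
    simp only [pvStepOne, blinkAlt, hbe, Bool.false_eq_true, if_false]
    have hslist : (PySem.Int.toStr x).toList = pvDigits m := by
      rw [PySem.Int.toList_toStr, pvToChars_eq x hx]
    have hlen : PySem.Str.len (PySem.Int.toStr x) = ((pvDigits m).length : Int) := by
      rw [PySem.Str.len_eq, hslist]
    set L : Nat := (pvDigits m).length with hLdef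
    have hL1 : 1 ≤ L := by
      rw [hLdef]
      have := List.length_pos_of_ne_nil (pvDigits_ne_nil m)
      omega
    have hd : ndigits x = (L : Int) := by rw [hm, pvNdigits_eq]
    have hmod : PySem.Int.mod ((L : Nat) : Int) 2 = ((L % 2 : Nat) : Int) := by
      rw [show (2 : Int) = ((2 : Nat) : Int) from rfl, PySem.Int.mod_natCast]
    rw [hlen, hd, hmod]
    by_cases hpar : L % 2 = 0
    · -- even digit count: both sides split the stone
      rw [if_pos (by simp [hpar]), if_neg (by simp [hpar])]
      have hflo : PySem.Int.floordiv ((L : Nat) : Int) 2 = ((L / 2 : Nat) : Int) := by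
        rw [show (2 : Int) = ((2 : Nat) : Int) from rfl, PySem.Int.floordiv_natCast]
      rw [hflo]
      have hLk : L - L / 2 = L / 2 := by omega
      have hsp := pvSplit m (L / 2)
      rw [← hLdef] at hsp
      have htake : (PySem.Str.slice (PySem.Int.toStr x) none (some ((L / 2 : Nat) : Int))).toList
          = (pvDigits m).take (L / 2) := by
        rw [PySem.Str.toList_slice, hslist, PySem.Chars.slice_eq_listSlice,
          PySem.List.slice_to_natCast]
      have hdrop : (PySem.Str.slice (PySem.Int.toStr x) (some ((L / 2 : Nat) : Int)) none).toList
          = (pvDigits m).drop (L / 2) := by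
        rw [PySem.Str.toList_slice, hslist, PySem.Chars.slice_eq_listSlice,
          PySem.List.slice_from_natCast]
      have htakeval : PySem.Int.ofStr? (PySem.Str.slice (PySem.Int.toStr x) none (some ((L / 2 : Nat) : Int)))
          = some ((pvValMSB ((pvDigits m).take (L / 2)) : Nat) : Int) := by
        rw [PySem.Int.ofStr?.eq_1, htake]
        refine pvOfCharsDigits _ ?_ ?_
        · have : ((pvDigits m).take (L / 2)).length = L / 2 := by
            rw [List.length_take]; omega
          intro hnil
          rw [hnil] at this
          simp at this
          omega
        · intro c hc; exact pvDigits_all_digit m c (List.mem_of_mem_take hc)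
      have hdropval : PySem.Int.ofStr? (PySem.Str.slice (PySem.Int.toStr x) (some ((L / 2 : Nat) : Int)) none)
          = some ((pvValMSB ((pvDigits m).drop (L / 2)) : Nat) : Int) := by
        rw [PySem.Int.ofStr?.eq_1, hdrop]
        refine pvOfCharsDigits _ ?_ ?_
        · have : ((pvDigits m).drop (L / 2)).length = L - L / 2 := by
            rw [List.length_drop]
          intro hnil
          rw [hnil] at this
          simp at this
          omega
        · intro c hc; exact pvDigits_all_digit m c (List.mem_of_mem_drop hc)
      rw [htakeval, hdropval]
      simp only [Option.getD_some]
      have hp : ((10 : Int) ^ (((L / 2 : Nat) : Int)).toNat) = (((10 : Nat) ^ (L / 2) : Nat) : Int) := by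
        rw [Int.toNat_natCast]
        push_cast
        ring
      rw [hp]
      have hfd : PySem.Int.floordiv x ((10 ^ (L / 2) : Nat) : Int) = ((m / 10 ^ (L / 2) : Nat) : Int) := by
        rw [hm, PySem.Int.floordiv_natCast]
      have hmd : PySem.Int.mod x ((10 ^ (L / 2) : Nat) : Int) = ((m % 10 ^ (L / 2) : Nat) : Int) := by
        rw [hm, PySem.Int.mod_natCast]
      rw [hfd, hmd, hsp.1, hsp.2, hLk]
    · -- odd digit count: both sides multiply by 2024
      have h1 : L % 2 = 1 := by omega
      rw [if_neg (by simp [h1]), if_pos (by simp [h1])]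

-- negative stones kept by Pre_: |x| has an even digit count, so str(x) (with the '-') has odd
-- length and A multiplies; B sees a value < 10, digit count 1, and multiplies too
theorem pvStepOne_eq_neg (x : Int) (hx : x < 0)
    (heven : (pvDigits (-x).toNat).length % 2 = 0) : pvStepOne x = blinkAlt x := by
  have hbe : (x == 0) = false := by simp; omega
  simp only [pvStepOne, blinkAlt, hbe, Bool.false_eq_true, if_false]
  have habs : x.natAbs = (-x).toNat := by omega
  have hchars : PySem.Int.toChars x = '-' :: pvDigits (-x).toNat := by
    rw [PySem.Int.toChars, if_pos hx, habs, pvToDigits_eq]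
  have hlen : PySem.Str.len (PySem.Int.toStr x)
      = (((pvDigits (-x).toNat).length + 1 : Nat) : Int) := by
    rw [PySem.Str.len_eq, PySem.Int.toList_toStr, hchars, List.length_cons]
  rw [hlen]
  have hmod : PySem.Int.mod ((((pvDigits (-x).toNat).length + 1 : Nat)) : Int) 2
      = ((((pvDigits (-x).toNat).length + 1) % 2 : Nat) : Int) := by
    rw [show (2 : Int) = ((2 : Nat) : Int) from rfl, PySem.Int.mod_natCast]
  rw [hmod]
  have hcondA : ¬(((((pvDigits (-x).toNat).length + 1) % 2 : Nat) : Int) == 0) = true := by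
    simp
    omega
  rw [if_neg hcondA]
  have hd1 : ndigits x = 1 := by rw [ndigits, if_pos (by omega)]
  rw [hd1]
  rw [if_pos (by decide)]

theorem pvStepOne_eq_pre (x : Int)
    (hx : 0 ≤ x ∨ (10 ≤ -x ∧ -x ≤ 99) ∨ (1000 ≤ -x ∧ -x ≤ 9999) ∨
      (100000 ≤ -x ∧ -x ≤ 999999) ∨ (10000000 ≤ -x ∧ -x ≤ 99999999) ∨
      (1000000000 ≤ -x ∧ -x ≤ 9999999999)) : pvStepOne x = blinkAlt x := by
  rcases hx with h | h | h | h | h | h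
  · exact pvStepOne_eq x h
  · exact pvStepOne_eq_neg x (by omega)
      (by rw [pvDigits_length_eq 1 (-x).toNat (by norm_num; omega) (by norm_num; omega)])
  · exact pvStepOne_eq_neg x (by omega)
      (by rw [pvDigits_length_eq 3 (-x).toNat (by norm_num; omega) (by norm_num; omega)])
  · exact pvStepOne_eq_neg x (by omega)
      (by rw [pvDigits_length_eq 5 (-x).toNat (by norm_num; omega) (by norm_num; omega)])
  · exact pvStepOne_eq_neg x (by omega)
      (by rw [pvDigits_length_eq 7 (-x).toNat (by norm_num; omega) (by norm_num; omega)])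
  · exact pvStepOne_eq_neg x (by omega)
      (by rw [pvDigits_length_eq 9 (-x).toNat (by norm_num; omega) (by norm_num; omega)])

theorem pvStep_foldl (l : List Int) : ∀ acc : List Int,
    l.foldl (fun new x =>
      if x == 0 then
        new ++ [1]
      else if PySem.Int.mod (PySem.Str.len (PySem.Int.toStr x)) 2 == 0 then
        let s := PySem.Int.toStr x
        let l := PySem.Str.len s
        new ++ [(PySem.Int.ofStr? (PySem.Str.slice s none (some (PySem.Int.floordiv l 2)))).getD 0,
                (PySem.Int.ofStr? (PySem.Str.slice s (some (PySem.Int.floordiv l 2)) none)).getD 0]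
      else
        new ++ [x * 2024]) acc = acc ++ l.flatMap pvStepOne := by
  induction l with
  | nil => intro acc; simp
  | cons x l ih =>
    intro acc
    rw [List.foldl_cons, ih, List.flatMap_cons]
    have hbody : ∀ a : List Int,
        (if x == 0 then a ++ [1]
         else if PySem.Int.mod (PySem.Str.len (PySem.Int.toStr x)) 2 == 0 then
           let s := PySem.Int.toStr x
           let l := PySem.Str.len s
           a ++ [(PySem.Int.ofStr? (PySem.Str.slice s none (some (PySem.Int.floordiv l 2)))).getD 0,
                 (PySem.Int.ofStr? (PySem.Str.slice s (some (PySem.Int.floordiv l 2)) none)).getD 0]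
         else a ++ [x * 2024]) = a ++ pvStepOne x := by
      intro a
      rw [pvStepOne]
      split_ifs <;> rfl
    rw [hbody, List.append_assoc]

theorem pvStep_eq_flatMap (stones : List Int) : step stones = stones.flatMap pvStepOne := by
  rw [step, pvStep_foldl]
  simp

-- ===== VERDICT (by name: the statement is the Claim_ definition above) =====
theorem step_spec : Claim_equal_step := by
  intro stones hdom hpre
  unfold Spec_step
  rw [pvStep_eq_flatMap, step_alt]
  induction stones with
  | nil => rfl
  | cons x l ih =>
    rw [List.flatMap_cons, List.flatMap_cons]
    have hdoml : Dom_step l := by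
      unfold Dom_step at hdom ⊢
      simp only [List.all_cons, Bool.and_eq_true] at hdom
      exact hdom.2
    rw [pvStepOne_eq_pre x (hpre x (List.mem_cons_self ..)),
      ih hdoml (fun y hy => hpre y (List.mem_cons_of_mem _ hy))]
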